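-- pv_equiv track=rewrite | github.com/MrBrantCode/unitest_baseline | mut_generate/mist_train_cf/cf_51436/solution.py | PrimeFibonacci
-- ===== SOURCE A (Python) =====
-- def PrimeFibonacci(limit):
--     def check_prime(n):
--         if n <= 1:
--             return False
--         if n <= 3:
--             return True
--         if n % 2 == 0 or n % 3 == 0:
--             return False
--         i = 5
--         while i * i <= n:
--             if n % i == 0 or n % (i + 2) == 0:
--                 return False
--             i += 6
--         return True
--
--     numbers = [0, 1]
--     while numbers[-1] + numbers[-2] < limit:
--         numbers.append(numbers[-1] + numbers[-2])
--     return [num for num in numbers if check_prime(num)]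
-- ===== SOURCE B (Python) =====
-- # Prime Fibonacci numbers are extremely sparse: the only ones below 2**31 are the
-- # ten constants below (the next one is F(47) = 2971215073 > 2**31).  Since the
-- # task's input domain bounds |limit| by 2**31, the result is just the prefix of
-- # this fixed table strictly below limit -- no generation or primality testing.
-- _PRIME_FIBS = [2, 3, 5, 13, 89, 233, 1597, 28657, 514229, 433494437]
--
-- def PrimeFibonacci(limit):
--     return [p for p in _PRIME_FIBS if p < limit]
-- ===== Notes on version B (the rewrite author's own statement) =====
-- stated objective: simpler
-- what changed: B replaces A's Fibonacci-list generation plus trial-division primality filtering by filtering a precomputed constant table of the ten prime Fibonacci numbers below 2^31, which covers the whole stated |limit| <= 2^31 input domain (the next prime Fibonacci number is 2971215073).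
import Mathlib
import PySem

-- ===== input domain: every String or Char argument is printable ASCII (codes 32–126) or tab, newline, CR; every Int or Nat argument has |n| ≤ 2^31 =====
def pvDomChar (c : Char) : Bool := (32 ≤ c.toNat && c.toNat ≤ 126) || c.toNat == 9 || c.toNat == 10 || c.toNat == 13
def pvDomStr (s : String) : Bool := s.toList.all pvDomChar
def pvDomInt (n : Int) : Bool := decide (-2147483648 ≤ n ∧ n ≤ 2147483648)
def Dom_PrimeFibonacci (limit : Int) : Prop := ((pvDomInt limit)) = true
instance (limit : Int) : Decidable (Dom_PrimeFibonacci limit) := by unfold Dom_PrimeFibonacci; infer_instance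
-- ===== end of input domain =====

-- B replaces generating Fibonacci numbers and trial-division primality testing by filtering a
-- precomputed table of the ten prime Fibonacci numbers below 2^31, which covers the whole
-- |limit| ≤ 2^31 input domain; objective: simpler.

-- ===== PORT A =====
-- check_prime's trial-division while loop; fuel merely makes it total (the loop body is
-- Python's, step for step; fuel n+1 exceeds the ≤ sqrt(n)/6 iterations the loop performs).
def checkPrimeLoopA (n : Int) (i : Int) (fuel : Nat) : Bool :=
  match fuel with
  | 0 => true
  | fuel + 1 =>
    if i * i ≤ n then
      if PySem.Int.mod n i = 0 || PySem.Int.mod n (i + 2) = 0 then false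
      else checkPrimeLoopA n (i + 6) fuel
    else true

def checkPrimeA (n : Int) : Bool :=
  if n ≤ 1 then false
  else if n ≤ 3 then true
  else if PySem.Int.mod n 2 = 0 || PySem.Int.mod n 3 = 0 then false
  else checkPrimeLoopA n 5 (n.toNat + 1)

-- A's while loop; `prev`/`last` mirror numbers[-2]/numbers[-1] (the list always holds ≥ 2
-- elements).  Fuel makes it total; each step raises prev+last by ≥ 1, so limit+1 steps suffice.
def fibBuildA (limit prev last : Int) (numbers : List Int) (fuel : Nat) : List Int :=
  match fuel with
  | 0 => numbers
  | fuel + 1 =>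
    if last + prev < limit then
      fibBuildA limit last (last + prev) (numbers ++ [last + prev]) fuel
    else numbers

def PrimeFibonacci (limit : Int) : List Int :=
  (fibBuildA limit 0 1 [0, 1] (limit.toNat + 1)).filter checkPrimeA

-- ===== PORT B =====
-- Source B's module constant: the ten prime Fibonacci numbers below 2^31.
def primeFibTable : List Int :=
  [2, 3, 5, 13, 89, 233, 1597, 28657, 514229, 433494437]

def PrimeFibonacci_alt (limit : Int) : List Int :=
  primeFibTable.filter (fun p => p < limit)

-- ===== PRECONDITION & SPEC =====
def Spec_PrimeFibonacci (limit : Int) (out : List Int) : Prop := out = PrimeFibonacci_alt limit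
instance (limit : Int) (out : List Int) : Decidable (Spec_PrimeFibonacci limit out) := by unfold Spec_PrimeFibonacci; infer_instance

-- ===== CLAIM =====
def Claim_equal_PrimeFibonacci : Prop := ∀ (limit : Int), Dom_PrimeFibonacci limit → Spec_PrimeFibonacci limit (PrimeFibonacci limit)

-- ===== LEMMAS AND PROOFS =====

-- The Fibonacci terms A's loop can append, F(2)..F(46); the next term is 2971215073 > 2^31.
def fibRest : List Int :=
  [1, 2, 3, 5, 8, 13, 21, 34, 55, 89, 144, 233, 377, 610, 987, 1597, 2584, 4181,
   6765, 10946, 17711, 28657, 46368, 75025, 121393, 196418, 317811, 514229,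
   832040, 1346269, 2178309, 3524578, 5702887, 9227465, 14930352, 24157817,
   39088169, 63245986, 102334155, 165580141, 267914296, 433494437, 701408733,
   1134903170, 1836311903]

-- rest is exactly the chain of successive pair-sums starting from (p, l)
def fibSeqChk (p l : Int) : List Int → Bool
  | [] => true
  | x :: r => x == p + l && fibSeqChk l x r

-- the pair-sum reached after consuming the whole chain
def finalSum (p l : Int) : List Int → Int
  | [] => p + l
  | x :: r => finalSum l x r

theorem tw_len (limit : Int) : ∀ (l : List Int) (m : Int),
    List.Pairwise (· < ·) l → (∀ x ∈ l, m ≤ x) →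
    (l.takeWhile (fun x => decide (x < limit))).length ≤ (limit - m).toNat := by
  intro l
  induction l with
  | nil => intro m _ _; simp
  | cons x r ih =>
    intro m hp hm
    by_cases hx : x < limit
    · rw [List.takeWhile_cons_of_pos (by simpa using hx), List.length_cons]
      have h1 : ∀ y ∈ r, x + 1 ≤ y := fun y hy => by
        have := (List.pairwise_cons.mp hp).1 y hy; omega
      have h2 := ih (x + 1) (List.pairwise_cons.mp hp).2 h1
      have hmx : m ≤ x := hm x (List.mem_cons_self ..)
      omega
    · rw [List.takeWhile_cons_of_neg (by simpa using hx)]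
      simp

theorem tw_eq_filter (limit : Int) : ∀ (l : List Int),
    List.Pairwise (· < ·) l →
    l.takeWhile (fun x => decide (x < limit)) = l.filter (fun x => decide (x < limit)) := by
  intro l
  induction l with
  | nil => intro _; rfl
  | cons x r ih =>
    intro hp
    by_cases hx : x < limit
    · rw [List.takeWhile_cons_of_pos (by simpa using hx),
          List.filter_cons_of_pos (by simpa using hx), ih (List.pairwise_cons.mp hp).2]
    · have hall : ∀ y ∈ r, ¬ y < limit := fun y hy => by
        have := (List.pairwise_cons.mp hp).1 y hy; omega
      rw [List.takeWhile_cons_of_neg (by simpa using hx),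
          List.filter_cons_of_neg (by simpa using hx),
          List.filter_eq_nil_iff.mpr (by intro y hy; simpa using hall y hy)]

-- A's loop, run with enough fuel, appends exactly the chain prefix of terms < limit.
theorem build_eq (limit : Int) : ∀ (rest : List Int) (p l : Int) (nums : List Int) (fuel : Nat),
    fibSeqChk p l rest = true → limit ≤ finalSum p l rest →
    (rest.takeWhile (fun x => decide (x < limit))).length ≤ fuel →
    fibBuildA limit p l nums fuel = nums ++ rest.takeWhile (fun x => decide (x < limit)) := by
  intro rest
  induction rest with
  | nil =>
    intro p l nums fuel _ hfin _
    simp only [finalSum] at hfin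
    cases fuel with
    | zero => simp [fibBuildA]
    | succ fuel => simp [fibBuildA, show ¬ l + p < limit from by omega]
  | cons x r ih =>
    intro p l nums fuel hchk hfin hfuel
    simp only [fibSeqChk, Bool.and_eq_true, beq_iff_eq] at hchk
    obtain ⟨hx, hr⟩ := hchk
    subst hx
    simp only [finalSum] at hfin
    by_cases hlt : p + l < limit
    · rw [List.takeWhile_cons_of_pos (by simpa using hlt), List.length_cons] at hfuel
      rw [List.takeWhile_cons_of_pos (by simpa using hlt)]
      cases fuel with
      | zero => omega
      | succ fuel =>
        rw [fibBuildA]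
        rw [if_pos (show l + p < limit from by omega)]
        have hlp : l + p = p + l := by ring
        rw [hlp, ih l (p + l) (nums ++ [p + l]) fuel hr hfin (by omega)]
        simp
    · have stop : ¬ l + p < limit := by omega
      rw [List.takeWhile_cons_of_neg (by simpa using hlt)]
      cases fuel with
      | zero => simp [fibBuildA]
      | succ fuel => simp [fibBuildA, stop]

-- ===== VERDICT =====
set_option maxRecDepth 100000 in
theorem PrimeFibonacci_spec : Claim_equal_PrimeFibonacci := by
  intro limit hdom
  unfold Dom_PrimeFibonacci pvDomInt at hdom
  have hlim : -2147483648 ≤ limit ∧ limit ≤ 2147483648 := by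
    simpa using hdom
  unfold Spec_PrimeFibonacci PrimeFibonacci
  have hchk : fibSeqChk 0 1 fibRest = true := by decide
  have hfin : limit ≤ finalSum 0 1 fibRest := by
    have : finalSum 0 1 fibRest = 2971215073 := by decide
    omega
  have hpair : List.Pairwise (· < ·) fibRest := by decide
  have hone : ∀ x ∈ fibRest, (1 : Int) ≤ x := by decide
  have hlen := tw_len limit fibRest 1 hpair hone
  have hfuel : (fibRest.takeWhile (fun x => decide (x < limit))).length ≤ limit.toNat + 1 := by
    omega
  rw [build_eq limit fibRest 0 1 [0, 1] (limit.toNat + 1) hchk hfin hfuel,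
      tw_eq_filter limit fibRest hpair]
  rw [List.filter_append, List.filter_filter]
  have hcomm : (fibRest.filter fun x => checkPrimeA x && decide (x < limit)) =
      (fibRest.filter fun x => decide (x < limit) && checkPrimeA x) := by
    apply List.filter_congr; intro x _; exact Bool.and_comm ..
  rw [hcomm, ← List.filter_filter]
  have htab : fibRest.filter checkPrimeA = primeFibTable := by decide
  have h01 : ([0, 1] : List Int).filter checkPrimeA = [] := by decide
  rw [htab, h01]
  unfold PrimeFibonacci_alt
  simp
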